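-- pv_equiv track=rewrite | github.com/nastenkadreamer/lord_of_them_rings | 02_code/02_secondary/01_scraping/01_geo_platform_bhuvan/nrega_asset_categ.py | getKeywork2category
-- ===== SOURCE A (Python) =====
-- def getKeywork2category(category2keyword):
--     res = []
--     for category, keywords in category2keyword.items():
--         for keyword in keywords:
--             if '-' in keyword: continue
--             res.append([keyword, category])
--
--     for category, keywords in category2keyword.items():
--         for keyword in keywords:
--             if '-' not in keyword: continue
--             res.append([keyword, category])
--
--     return res
-- ===== SOURCE B (Python) =====
-- def getKeywork2category(category2keyword):
--     no_dash, with_dash = [], []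
--     for category, keywords in category2keyword.items():
--         for keyword in keywords:
--             (with_dash if '-' in keyword else no_dash).append([keyword, category])
--     return no_dash + with_dash
-- ===== Notes on version B (the rewrite author's own statement) =====
-- stated objective: alternative
-- what changed: B makes a single pass over the dict, routing each pair into one of two buffers (dash-free vs dashed) and concatenating them, instead of A's two full scans of all items.
import Mathlib
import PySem

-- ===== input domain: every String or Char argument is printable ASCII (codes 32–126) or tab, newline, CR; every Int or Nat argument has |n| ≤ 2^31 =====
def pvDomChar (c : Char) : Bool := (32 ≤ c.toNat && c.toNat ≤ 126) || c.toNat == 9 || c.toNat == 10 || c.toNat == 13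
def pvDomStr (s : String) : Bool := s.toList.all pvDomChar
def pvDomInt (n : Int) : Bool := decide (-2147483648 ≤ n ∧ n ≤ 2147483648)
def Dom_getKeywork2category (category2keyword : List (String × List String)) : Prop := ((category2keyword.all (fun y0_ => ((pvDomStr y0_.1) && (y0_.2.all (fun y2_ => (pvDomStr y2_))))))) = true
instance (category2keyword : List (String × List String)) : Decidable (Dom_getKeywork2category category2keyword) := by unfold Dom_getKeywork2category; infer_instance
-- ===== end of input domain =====

-- B replaces A's two full scans over the dict by one pass routing each [keyword, category]
-- into a dash-free or dashed buffer, then concatenates (alternative decomposition, same cost).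

-- shared transliteration of the Python test `'-' in keyword`
def pvHasDash (keyword : String) : Bool := PySem.Str.isIn "-" keyword

-- ===== PORT A =====
-- two sequential full scans, appending to one growing res list
def getKeywork2category (category2keyword : List (String × List String)) : List (List String) :=
  let res :=
    category2keyword.foldl (fun res p =>
      p.2.foldl (fun res keyword =>
        if pvHasDash keyword then res
        else res ++ [[keyword, p.1]]) res) []
  category2keyword.foldl (fun res p =>
    p.2.foldl (fun res keyword =>
      if !pvHasDash keyword then res
      else res ++ [[keyword, p.1]]) res) res

-- ===== PORT B =====
-- one pass with two buffers (no_dash, with_dash), concatenated at the end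
def getKeywork2category_alt (category2keyword : List (String × List String)) : List (List String) :=
  let acc :=
    category2keyword.foldl (fun (acc : List (List String) × List (List String)) p =>
      p.2.foldl (fun acc keyword =>
        if pvHasDash keyword then (acc.1, acc.2 ++ [[keyword, p.1]])
        else (acc.1 ++ [[keyword, p.1]], acc.2)) acc) ([], [])
  acc.1 ++ acc.2

-- ===== PRECONDITION & SPEC =====
def Spec_getKeywork2category (category2keyword : List (String × List String)) (out : List (List String)) : Prop := out = getKeywork2category_alt category2keyword
instance (category2keyword : List (String × List String)) (out : List (List String)) : Decidable (Spec_getKeywork2category category2keyword out) := by unfold Spec_getKeywork2category; infer_instance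

-- ===== CLAIM (what is proved, stated in full; the proofs are below) =====
def Claim_equal_getKeywork2category : Prop := ∀ (category2keyword : List (String × List String)), Dom_getKeywork2category category2keyword → Spec_getKeywork2category category2keyword (getKeywork2category category2keyword)

-- ===== LEMMAS AND PROOFS =====

-- canonical form: the dash-free pairs and the dashed pairs, each in input order
def pvNoDash (c : List (String × List String)) : List (List String) :=
  c.flatMap (fun p => (p.2.filter (fun k => !pvHasDash k)).map (fun k => [k, p.1]))

def pvDash (c : List (String × List String)) : List (List String) :=
  c.flatMap (fun p => (p.2.filter (fun k => pvHasDash k)).map (fun k => [k, p.1]))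

theorem innerA1 (cat : String) (ks : List String) (r : List (List String)) :
    ks.foldl (fun res keyword =>
      if pvHasDash keyword then res else res ++ [[keyword, cat]]) r
    = r ++ (ks.filter (fun k => !pvHasDash k)).map (fun k => [k, cat]) := by
  induction ks generalizing r with
  | nil => simp
  | cons h t ih =>
    simp only [List.foldl_cons, List.filter_cons]
    cases hh : pvHasDash h <;> simp [hh, ih]

theorem innerA2 (cat : String) (ks : List String) (r : List (List String)) :
    ks.foldl (fun res keyword =>
      if pvHasDash keyword = false then res else res ++ [[keyword, cat]]) r
    = r ++ (ks.filter (fun k => pvHasDash k)).map (fun k => [k, cat]) := by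
  induction ks generalizing r with
  | nil => simp
  | cons h t ih =>
    simp only [List.foldl_cons, List.filter_cons]
    cases hh : pvHasDash h <;> simp [hh, ih]

theorem outerA1 (c : List (String × List String)) (r : List (List String)) :
    c.foldl (fun res p =>
      p.2.foldl (fun res keyword =>
        if pvHasDash keyword then res else res ++ [[keyword, p.1]]) res) r
    = r ++ pvNoDash c := by
  induction c generalizing r with
  | nil => simp [pvNoDash]
  | cons h t ih => simp [pvNoDash, innerA1, ih, List.flatMap_cons, List.flatMap_def]

theorem outerA2 (c : List (String × List String)) (r : List (List String)) :
    c.foldl (fun res p =>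
      p.2.foldl (fun res keyword =>
        if pvHasDash keyword = false then res else res ++ [[keyword, p.1]]) res) r
    = r ++ pvDash c := by
  induction c generalizing r with
  | nil => simp [pvDash]
  | cons h t ih => simp [pvDash, innerA2, ih, List.flatMap_cons, List.flatMap_def]

theorem innerB (cat : String) (ks : List String) (a b : List (List String)) :
    ks.foldl (fun (acc : List (List String) × List (List String)) keyword =>
      if pvHasDash keyword then (acc.1, acc.2 ++ [[keyword, cat]])
      else (acc.1 ++ [[keyword, cat]], acc.2)) (a, b)
    = (a ++ (ks.filter (fun k => !pvHasDash k)).map (fun k => [k, cat]),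
       b ++ (ks.filter (fun k => pvHasDash k)).map (fun k => [k, cat])) := by
  induction ks generalizing a b with
  | nil => simp
  | cons h t ih =>
    simp only [List.foldl_cons, List.filter_cons]
    cases hh : pvHasDash h <;> simp [hh, ih]

theorem outerB (c : List (String × List String)) (a b : List (List String)) :
    c.foldl (fun (acc : List (List String) × List (List String)) p =>
      p.2.foldl (fun acc keyword =>
        if pvHasDash keyword then (acc.1, acc.2 ++ [[keyword, p.1]])
        else (acc.1 ++ [[keyword, p.1]], acc.2)) acc) (a, b)
    = (a ++ pvNoDash c, b ++ pvDash c) := by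
  induction c generalizing a b with
  | nil => simp [pvNoDash, pvDash]
  | cons h t ih => simp [pvNoDash, pvDash, innerB, ih, List.flatMap_cons, List.flatMap_def]

-- ===== VERDICT (by name: the statement is the Claim_ definition above) =====
theorem getKeywork2category_spec : Claim_equal_getKeywork2category := by
  intro c _
  unfold Spec_getKeywork2category getKeywork2category getKeywork2category_alt
  simp [outerA1, outerA2, outerB]
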